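-- pv_equiv track=rewrite | github.com/txje/Unicycler | lib/assembly_graph.py | find_replace_in_list
-- ===== SOURCE A (Python) =====
-- def find_replace_in_list(lst, pattern, replacement):
--     '''
--     This function looks for the given pattern in the list and if found, replaces it.
--     Example: find_replace_in_list([1,5,8,3], [5,8], 7) -> [1,7,3]
--     If there are multiple occurrences, it will replace them all.
--     '''
--     replacement_made = True
--     while replacement_made:
--         replacement_made = False
--         for i, _ in enumerate(lst):
--             if lst[i] == pattern[0] and lst[i:i+len(pattern)] == pattern:
--                 replacement_made = True
--                 lst = lst[:i] + replacement + lst[i+len(pattern):]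
--                 break
--     return lst
-- ===== SOURCE B (Python) =====
-- def find_replace_in_list(lst, pattern, replacement):
--     # Single buffered pass with a work stack: append elements one at a time,
--     # and whenever the buffer ends with the pattern, cut it off and push the
--     # replacement back onto the stack so newly-formed occurrences are caught.
--     if not pattern:
--         return list(lst)
--     m = len(pattern)
--     out = []
--     stack = lst[::-1]
--     while stack:
--         out.append(stack.pop())
--         if out[-m:] == pattern:
--             del out[-m:]
--             stack.extend(replacement[::-1])
--     return out
-- ===== Notes on version B (the rewrite author's own statement) =====
-- stated objective: faster
-- what changed: A restarts a full left-to-right scan from index 0 after every replacement; B makes a single buffered pass with a work stack, cutting a matched pattern off the end of the buffer and pushing the replacement back onto the stack, so each element is touched O(1) times instead of O(n).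
-- outside the precondition, e.g. on find_replace_in_list([1, 2, 2, 1], [1, 2], [2, 1]): A returns [2, 2, 1, 1], B returns [2, 2, 1, 1]; on find_replace_in_list([3], [], [7]): A raises IndexError, B returns [3]
import Mathlib
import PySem

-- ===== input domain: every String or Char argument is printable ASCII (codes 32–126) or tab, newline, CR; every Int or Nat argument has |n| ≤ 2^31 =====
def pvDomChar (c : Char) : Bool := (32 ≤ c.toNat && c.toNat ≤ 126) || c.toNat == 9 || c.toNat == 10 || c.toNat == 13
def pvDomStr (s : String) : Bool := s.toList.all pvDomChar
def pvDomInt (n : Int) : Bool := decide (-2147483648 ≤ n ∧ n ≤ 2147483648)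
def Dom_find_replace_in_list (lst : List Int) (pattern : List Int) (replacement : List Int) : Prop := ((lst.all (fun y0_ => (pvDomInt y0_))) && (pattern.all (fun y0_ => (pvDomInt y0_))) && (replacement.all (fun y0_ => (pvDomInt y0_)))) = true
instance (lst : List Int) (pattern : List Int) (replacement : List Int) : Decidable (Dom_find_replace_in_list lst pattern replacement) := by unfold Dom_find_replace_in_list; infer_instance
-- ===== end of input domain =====

-- B replaces A's restart-from-0 rescan loop by a single buffered pass with a work stack (one pass instead of repeated rescans).

-- ===== PORT A =====
-- One `for i, _ in enumerate(lst)` pass: `pre` is lst[:i], `cur` is lst[i:].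
-- `pattern.head? = some x` transliterates `lst[i] == pattern[0]` (head? is none exactly when
-- Python's pattern[0] would raise, making the condition false instead of raising);
-- `pattern.isPrefixOf cur` is `lst[i:i+len(pattern)] == pattern` (the clamped slice equals
-- pattern iff pattern is a prefix of lst[i:]).  Returns the rewritten list, or none if the
-- pass found no occurrence (replacement_made stayed False).
def pvPassA (pattern replacement : List Int) : List Int → List Int → Option (List Int)
  | _, [] => none
  | pre, x :: xs =>
    if pattern.head? = some x ∧ pattern.isPrefixOf (x :: xs) then
      some (pre ++ replacement ++ (x :: xs).drop pattern.length)
    else pvPassA pattern replacement (pre ++ [x]) xs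

-- Python's unbounded `while replacement_made` loop, with fuel: under Pre_ (proved below)
-- lst.length + 1 iterations are always sufficient, so the 0-fuel branch is unreachable there.
def pvLoopA (pattern replacement : List Int) : Nat → List Int → List Int
  | 0, lst => lst
  | fuel + 1, lst =>
    match pvPassA pattern replacement [] lst with
    | none => lst
    | some lst' => pvLoopA pattern replacement fuel lst'

def find_replace_in_list (lst : List Int) (pattern : List Int) (replacement : List Int) : List Int :=
  pvLoopA pattern replacement (lst.length + 1) lst

-- ===== PORT B =====
-- Source B's while loop: pop the next element from the work stack onto the buffer `out`
-- (the stack is kept here in popping order, so `x :: rest` is `stack.pop()`);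
-- `pattern.isSuffixOf out'` is `out[-m:] == pattern` (m = len(pattern) ≥ 1);
-- on a match delete the matched suffix and push the replacement back.  Fuel bounds the
-- pops; under Pre_ the chosen fuel is proved sufficient, so the 0-fuel branch is unreachable there.
def pvLoopB (pattern replacement : List Int) : Nat → List Int → List Int → List Int
  | _, out, [] => out
  | 0, out, pending => out ++ pending
  | fuel + 1, out, x :: rest =>
    if pattern.isSuffixOf (out ++ [x]) then
      pvLoopB pattern replacement fuel ((out ++ [x]).take ((out ++ [x]).length - pattern.length)) (replacement ++ rest)
    else pvLoopB pattern replacement fuel (out ++ [x]) rest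

def find_replace_in_list_alt (lst : List Int) (pattern : List Int) (replacement : List Int) : List Int :=
  if pattern = [] then lst
  else pvLoopB pattern replacement ((lst.length + 1) * (replacement.length + 1)) [] lst

-- ===== PRECONDITION & SPEC =====
-- Pre_ excludes (a) empty patterns with non-empty lst, on which A raises IndexError, and
-- (b) inputs where the pattern occurs in lst while the replacement contains at least as many
-- copies of every pattern element as the pattern itself does: that is exactly the regime in
-- which A's rewrite loop can run forever (e.g. pattern [1], replacement [1]); on such inputs
-- that do happen to terminate A and B still agree (B performs the same leftmost rewrites),
-- but no finite fuel bound is provable, so they stay outside the claim.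
def Pre_find_replace_in_list (lst : List Int) (pattern : List Int) (replacement : List Int) : Prop :=
  (pattern = [] ∧ lst = []) ∨
    (pattern ≠ [] ∧
      (¬ pattern <:+: lst ∨ ∃ x ∈ pattern, replacement.count x < pattern.count x))
instance (lst : List Int) (pattern : List Int) (replacement : List Int) : Decidable (Pre_find_replace_in_list lst pattern replacement) := by unfold Pre_find_replace_in_list; infer_instance

def pvWitness_find_replace_in_list : List Int × List Int × List Int := ([1, 5, 8, 3], [5, 8], [7])

def Spec_find_replace_in_list (lst : List Int) (pattern : List Int) (replacement : List Int) (out : List Int) : Prop := out = find_replace_in_list_alt lst pattern replacement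
instance (lst : List Int) (pattern : List Int) (replacement : List Int) (out : List Int) : Decidable (Spec_find_replace_in_list lst pattern replacement out) := by unfold Spec_find_replace_in_list; infer_instance

-- ===== CLAIM (what is proved, stated in full; the proofs are below) =====
def Claim_equal_find_replace_in_list : Prop := ∀ (lst : List Int) (pattern : List Int) (replacement : List Int), Dom_find_replace_in_list lst pattern replacement → Pre_find_replace_in_list lst pattern replacement → Spec_find_replace_in_list lst pattern replacement (find_replace_in_list lst pattern replacement)

-- ===== LEMMAS AND PROOFS =====

-- pvPassA's accumulator only prefixes the result.
lemma pvPassA_acc (p r : List Int) :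
    ∀ (cur pre : List Int),
      pvPassA p r pre cur = (pvPassA p r [] cur).map (fun z => pre ++ z) := by
  intro cur
  induction cur with
  | nil => intro pre; rfl
  | cons x xs ih =>
    intro pre
    by_cases h : p.head? = some x ∧ p.isPrefixOf (x :: xs)
    · simp [pvPassA, h]
    · simp only [pvPassA, if_neg h]
      rw [ih (pre ++ [x]), ih ([] ++ [x])]
      cases pvPassA p r [] xs <;> simp

-- No occurrence in cur ⇒ the pass reports none.
lemma pvPassA_none (p r : List Int) :
    ∀ (cur pre : List Int), ¬ p <:+: cur → pvPassA p r pre cur = none := by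
  intro cur
  induction cur with
  | nil => intro pre _; rfl
  | cons x xs ih =>
    intro pre h
    have hc : ¬ (p.head? = some x ∧ p.isPrefixOf (x :: xs)) := by
      rintro ⟨-, hpre⟩
      exact h (List.IsPrefix.isInfix (by simpa using hpre))
    simp only [pvPassA, if_neg hc]
    exact ih _ (fun hin => h (List.infix_cons hin))

-- An infix of l ++ [x] is an infix of l or a suffix of l ++ [x].
lemma pv_infix_concat {p l : List Int} {x : Int} (h : p <:+: (l ++ [x])) :
    p <:+: l ∨ p <:+ (l ++ [x]) := by
  obtain ⟨s, t, hst⟩ := h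
  rcases List.eq_nil_or_concat t with rfl | ⟨t', y, rfl⟩
  · right; exact ⟨s, by simpa using hst⟩
  · left
    have h2 : (s ++ p ++ t') ++ [y] = l ++ [x] := by simpa using hst
    have h3 := (List.append_inj' h2 rfl).1
    exact ⟨s, t', by simpa using h3⟩

-- If out has no occurrence and out ++ [x] ends with p, the pass on out ++ x :: rest
-- rewrites exactly that (leftmost) occurrence.
lemma pvPassA_found (p r : List Int) (hp : p ≠ []) (x : Int) (rest : List Int) :
    ∀ (out : List Int), ¬ p <:+: out → p <:+ (out ++ [x]) →
      pvPassA p r [] (out ++ x :: rest) =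
        some (out.take (out.length + 1 - p.length) ++ r ++ rest) := by
  intro out
  induction out with
  | nil =>
    intro _ hs
    have hple : 1 ≤ p.length := List.length_pos_of_ne_nil hp
    have hpx : p = [x] := by
      obtain ⟨t, ht⟩ := hs
      have hl : t.length + p.length = 1 := by simpa using congrArg List.length ht
      have ht0 : t = [] := List.eq_nil_of_length_eq_zero (by omega)
      subst ht0; simpa using ht
    simp [pvPassA, hpx]
  | cons y o ih =>
    intro hninf hs
    have hple : p.length ≤ o.length + 2 := by simpa using hs.length_le
    by_cases hlen : p.length ≤ o.length + 1
    · have hs' : p <:+ (o ++ [x]) := by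
        obtain ⟨t, ht⟩ := hs
        cases t with
        | nil =>
          exfalso
          have : p.length = o.length + 2 := by simpa using congrArg List.length ht
          omega
        | cons a t' =>
          refine ⟨t', ?_⟩
          have ht2 : a :: (t' ++ p) = y :: (o ++ [x]) := by simpa using ht
          exact (List.cons.injEq _ _ _ _ ▸ ht2 |> And.right) ▸ rfl
      have hninf' : ¬ p <:+: o := fun h => hninf (List.infix_cons h)
      have hc : ¬ (p.head? = some y ∧ p.isPrefixOf (y :: (o ++ x :: rest))) := by
        rintro ⟨-, hpre⟩
        have hpre' : p <+: ((y :: o) ++ x :: rest) := by simpa using hpre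
        have htk : p = ((y :: o) ++ x :: rest).take p.length := List.prefix_iff_eq_take.mp hpre'
        have htk2 : ((y :: o) ++ x :: rest).take p.length = (y :: o).take p.length :=
          List.take_append_of_le_length (by simpa using hlen)
        have : p <+: (y :: o) := by rw [htk, htk2]; exact List.take_prefix _ _
        exact hninf this.isInfix
      have hun : pvPassA p r [] ((y :: o) ++ x :: rest) = pvPassA p r ([] ++ [y]) (o ++ x :: rest) := by
        simp only [List.cons_append, pvPassA, if_neg hc]
      rw [hun, pvPassA_acc, ih hninf' hs']
      have harith : (y :: o).length + 1 - p.length = (o.length + 1 - p.length) + 1 := by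
        simp only [List.length_cons]; omega
      simp only [List.length_cons] at harith ⊢
      rw [harith, List.take_succ_cons]
      simp
    · have hpl : p.length = o.length + 2 := by omega
      have hpeq : p = y :: (o ++ [x]) := by
        obtain ⟨t, ht⟩ := hs
        have hl : t.length + p.length = o.length + 2 := by simpa using congrArg List.length ht
        have ht0 : t = [] := List.eq_nil_of_length_eq_zero (by omega)
        subst ht0; simpa using ht
      have hc : p.head? = some y ∧ p.isPrefixOf (y :: (o ++ x :: rest)) := by
        refine ⟨by rw [hpeq]; rfl, ?_⟩
        have hpfx : p <+: (y :: (o ++ x :: rest)) := by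
          refine ⟨rest, ?_⟩; rw [hpeq]; simp
        simpa using hpfx
      have hun : pvPassA p r [] ((y :: o) ++ x :: rest) =
          some ([] ++ r ++ (y :: (o ++ x :: rest)).drop p.length) := by
        simp only [List.cons_append, pvPassA, if_pos hc]
      rw [hun]
      have hdrop : (y :: (o ++ x :: rest)).drop p.length = rest := by
        have hsplit : y :: (o ++ x :: rest) = (y :: (o ++ [x])) ++ rest := by simp
        rw [hsplit, hpl]
        have : (y :: (o ++ [x])).length = o.length + 2 := by simp
        rw [← this, List.drop_left]
      have htake : (y :: o).length + 1 - p.length = 0 := by simp only [List.length_cons]; omega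
      rw [hdrop, htake]
      simp

-- Main simulation: B's buffered pass computes A's leftmost-rewrite fixpoint,
-- for any measure μ that strictly decreases at each rewrite.
lemma pv_main (p r : List Int) (hp : p ≠ []) (μ : List Int → Nat)
    (Hμ : ∀ a b, μ (a ++ r ++ b) < μ (a ++ p ++ b)) :
    ∀ (fB : Nat) (fA : Nat) (out pending : List Int), ¬ p <:+: out →
      μ (out ++ pending) < fA →
      pending.length + μ (out ++ pending) * r.length < fB →
      pvLoopA p r fA (out ++ pending) = pvLoopB p r fB out pending := by
  intro fB
  induction fB with
  | zero => intro fA out pending _ _ hB; omega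
  | succ f ih =>
    intro fA out pending hninf hA hB
    cases pending with
    | nil =>
      cases fA with
      | zero => exact absurd hA (by omega)
      | succ fA' =>
        have hnone : pvPassA p r [] out = none := pvPassA_none p r out [] hninf
        simp [pvLoopA, pvLoopB, hnone]
    | cons xx rest =>
      have hp1 : 1 ≤ p.length := List.length_pos_of_ne_nil hp
      by_cases hsuf : p <:+ (out ++ [xx])
      · have hsufb : p.isSuffixOf (out ++ [xx]) = true := by simpa using hsuf
        have hplen : p.length ≤ out.length + 1 := by simpa using hsuf.length_le
        have hpass := pvPassA_found p r hp xx rest out hninf hsuf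
        obtain ⟨t, ht⟩ := hsuf
        have htlen : t.length = out.length + 1 - p.length := by
          have := congrArg List.length ht; simp at this; omega
        have hteq : t = out.take (out.length + 1 - p.length) := by
          have h1 : t = (t ++ p).take t.length := by simp
          rw [ht] at h1
          rw [h1, htlen, List.take_append_of_le_length (by omega)]
        have hdec : out ++ xx :: rest = out.take (out.length + 1 - p.length) ++ p ++ rest := by
          have h2 : (t ++ p) ++ rest = (out ++ [xx]) ++ rest := by rw [ht]
          rw [hteq] at h2
          simpa [List.append_assoc] using h2.symm
        have hmu : μ (out.take (out.length + 1 - p.length) ++ r ++ rest) < μ (out ++ xx :: rest) := by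
          rw [hdec]; exact Hμ _ _
        cases fA with
        | zero => exact absurd hA (by omega)
        | succ fA' =>
          have hA1 : pvLoopA p r (fA' + 1) (out ++ xx :: rest) =
              pvLoopA p r fA' (out.take (out.length + 1 - p.length) ++ r ++ rest) := by
            simp [pvLoopA, hpass]
          have htk : (out ++ [xx]).take ((out ++ [xx]).length - p.length) =
              out.take (out.length + 1 - p.length) := by
            have hlen2 : (out ++ [xx]).length - p.length = out.length + 1 - p.length := by
              simp
            rw [hlen2, List.take_append_of_le_length (by omega)]
          have hB1 : pvLoopB p r (f + 1) out (xx :: rest) =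
              pvLoopB p r f (out.take (out.length + 1 - p.length)) (r ++ rest) := by
            simp only [pvLoopB, if_pos hsufb, htk]
          rw [hA1, hB1]
          have hninf2 : ¬ p <:+: out.take (out.length + 1 - p.length) := fun h =>
            hninf (h.trans (List.take_prefix _ out).isInfix)
          have hassoc : out.take (out.length + 1 - p.length) ++ (r ++ rest) =
              out.take (out.length + 1 - p.length) ++ r ++ rest := by
            simp [List.append_assoc]
          have hmul : (μ (out.take (out.length + 1 - p.length) ++ r ++ rest) + 1) * r.length ≤
              μ (out ++ xx :: rest) * r.length := Nat.mul_le_mul_right _ (by omega)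
          rw [add_mul, one_mul] at hmul
          have hrlen : (r ++ rest).length = r.length + rest.length := by simp
          have hplenr : (xx :: rest).length = rest.length + 1 := by simp
          rw [hplenr] at hB
          rw [← hassoc]
          refine ih fA' _ (r ++ rest) hninf2 ?_ ?_
          · rw [hassoc]; omega
          · rw [hassoc, hrlen]; omega
      · have hsufb : ¬ p.isSuffixOf (out ++ [xx]) = true := by simpa using hsuf
        have hninf2 : ¬ p <:+: (out ++ [xx]) := by
          intro h
          rcases pv_infix_concat h with h1 | h2
          · exact hninf h1
          · exact hsuf h2
        have hassoc : out ++ xx :: rest = (out ++ [xx]) ++ rest := by simp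
        have hB1 : pvLoopB p r (f + 1) out (xx :: rest) = pvLoopB p r f (out ++ [xx]) rest := by
          simp only [pvLoopB, if_neg hsufb]
        rw [hB1, hassoc]
        refine ih fA (out ++ [xx]) rest hninf2 ?_ ?_
        · rw [← hassoc]; exact hA
        · rw [← hassoc]
          have : (xx :: rest).length = rest.length + 1 := by simp
          rw [this] at hB
          omega

-- No occurrence anywhere ⇒ B just moves everything across.
lemma pv_Bnone (p r : List Int) :
    ∀ (fB : Nat) (out pending : List Int), ¬ p <:+: (out ++ pending) →
      pending.length < fB → pvLoopB p r fB out pending = out ++ pending := by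
  intro fB
  induction fB with
  | zero => intro out pending _ h; exact absurd h (by omega)
  | succ f ih =>
    intro out pending hninf hlen
    cases pending with
    | nil => simp [pvLoopB]
    | cons x rest =>
      have hsuf : ¬ p.isSuffixOf (out ++ [x]) = true := by
        intro hb
        have hs : p <:+ (out ++ [x]) := by simpa using hb
        apply hninf
        obtain ⟨t, ht⟩ := hs
        exact ⟨t, rest, by rw [ht]; simp⟩
      simp only [pvLoopB, if_neg hsuf]
      have heq : (out ++ [x]) ++ rest = out ++ x :: rest := by simp
      rw [ih (out ++ [x]) rest (by rw [heq]; exact hninf) (by simp at hlen ⊢; omega), heq]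

-- ===== VERDICT (by name: the statements are the Claim_ definitions above) =====
theorem find_replace_in_list_spec : Claim_equal_find_replace_in_list := by
  unfold Claim_equal_find_replace_in_list
  intro lst p r _ hpre
  unfold Spec_find_replace_in_list find_replace_in_list find_replace_in_list_alt
  rcases hpre with ⟨hp0, hl0⟩ | ⟨hp, hcase⟩
  · subst hp0; subst hl0; rfl
  rw [if_neg hp]
  have happly : ∀ (μ : List Int → Nat), (∀ a b, μ (a ++ r ++ b) < μ (a ++ p ++ b)) →
      μ lst ≤ lst.length →
      pvLoopA p r (lst.length + 1) lst =
        pvLoopB p r ((lst.length + 1) * (r.length + 1)) [] lst := by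
    intro μ Hμ hle
    have hb1 : μ ([] ++ lst) < lst.length + 1 := by simpa using Nat.lt_succ_of_le hle
    have hb2 : lst.length + μ ([] ++ lst) * r.length < (lst.length + 1) * (r.length + 1) := by
      have h1 : μ ([] ++ lst) * r.length ≤ lst.length * r.length :=
        Nat.mul_le_mul_right _ (by simpa using hle)
      have h2 : (lst.length + 1) * (r.length + 1) =
          lst.length * r.length + lst.length + r.length + 1 := by ring
      omega
    have := pv_main p r hp μ Hμ ((lst.length + 1) * (r.length + 1)) (lst.length + 1) [] lst
      (by simpa using hp) hb1 hb2
    simpa using this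
  rcases hcase with hno | ⟨x, hxp, hcnt⟩
  · have hA : pvLoopA p r (lst.length + 1) lst = lst := by
      simp [pvLoopA, pvPassA_none p r lst [] hno]
    have hBlen : lst.length < (lst.length + 1) * (r.length + 1) :=
      Nat.lt_of_lt_of_le (by omega) (Nat.le_mul_of_pos_right _ (by omega))
    have hB := pv_Bnone p r ((lst.length + 1) * (r.length + 1)) [] lst (by simpa using hno) hBlen
    rw [hA, hB]; simp
  · refine happly (fun l => l.count x) ?_ (List.count_le_length)
    intro a b
    simp only [List.count_append]
    omega
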